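-- pv_equiv track=rewrite | github.com/Zippy-Zappy/FinalParadigmas | relacionales.py | es_operador_relacional
-- ===== SOURCE A (Python) =====
-- def es_operador_relacional(lexema):
--     """Recorre la cadena de entrada y utiliza la tabla de transición DELTA
--     para determinar si la cadena es un operador relacional válido."""
--     Q0 = 0 # Estado inicial
--     Q = [0, 1, 2, 3, 4]
--     F = [2, 3] # Estados finales
--
--
--     SIGMA = {
--         "=": 0,
--         "<": 1,
--         ">": 2,
--         "!": 3,
--         "o": 4,
--     }
--
--     DELTA = [
--         [1, 2, 2, 1, 4],  # Estado 0
--         [3, 4, 4, 4, 4],  # Estado 1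
--         [3, 4, 4, 4, 4],  # Estado 2
--         [4, 4, 4, 4, 4], # Estado 3
--         [4, 4, 4, 4, 4]  # Estado 4 (Estado muerto)
--     ]
--
--
--     def obtener_simbolo_index(simbolo):
--         """Devuelve el índice del símbolo según el diccionario SIGMA."""
--
--         if simbolo in SIGMA:
--             return SIGMA[simbolo]
--
--         return SIGMA["o"]
--
--
--
--     estado_actual = Q0  # Estado inicial
--
--     for simbolo in lexema:
--         simbolo_index = obtener_simbolo_index(simbolo)
--         estado_actual = DELTA[estado_actual][simbolo_index]
--
--         if estado_actual == 4:  # Estado muerto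
--             return False
--
--     return estado_actual in F  # Verifica si el estado final es válido
-- ===== SOURCE B (Python) =====
-- def es_operador_relacional(lexema):
--     """The DFA accepts exactly the six relational operators; recognize them
--     by collecting the elements once and doing a single set-membership test."""
--     t = tuple(lexema)
--     return t in {('<',), ('>',), ('=', '='), ('!', '='), ('<', '='), ('>', '=')}
-- ===== Notes on version B (the rewrite author's own statement) =====
-- stated objective: simpler
-- what changed: Replaced the state-table DFA traversal with a single set-membership test of the character tuple against the six accepted operator sequences.
import Mathlib
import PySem

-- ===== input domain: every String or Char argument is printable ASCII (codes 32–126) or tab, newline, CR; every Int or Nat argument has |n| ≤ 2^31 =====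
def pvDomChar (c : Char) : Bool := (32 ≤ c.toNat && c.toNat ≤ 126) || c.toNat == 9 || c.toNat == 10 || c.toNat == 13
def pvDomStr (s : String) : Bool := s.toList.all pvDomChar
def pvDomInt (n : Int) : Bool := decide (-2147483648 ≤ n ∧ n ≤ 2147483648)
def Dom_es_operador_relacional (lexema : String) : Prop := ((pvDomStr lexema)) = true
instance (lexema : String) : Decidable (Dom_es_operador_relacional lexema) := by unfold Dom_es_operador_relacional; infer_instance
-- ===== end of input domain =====

-- B replaces A's state-table DFA loop by one membership test of the character
-- list against the six accepted operator sequences (objective: simpler).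

-- ===== PORT A =====
-- SIGMA lookup with default "o" → 4
def pvSigmaIdx (simbolo : Char) : Nat :=
  if simbolo = '=' then 0
  else if simbolo = '<' then 1
  else if simbolo = '>' then 2
  else if simbolo = '!' then 3
  else 4

def pvDELTA : List (List Nat) :=
  [[1, 2, 2, 1, 4],
   [3, 4, 4, 4, 4],
   [3, 4, 4, 4, 4],
   [4, 4, 4, 4, 4],
   [4, 4, 4, 4, 4]]

-- the for-loop with its early `return False` on the dead state
def pvLoopA (estado : Nat) : List Char → Bool
  | [] => estado = 2 || estado = 3
  | simbolo :: rest =>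
    let estado' := (pvDELTA.getD estado []).getD (pvSigmaIdx simbolo) 4
    if estado' = 4 then false else pvLoopA estado' rest

def es_operador_relacional (lexema : String) : Bool :=
  pvLoopA 0 lexema.toList

-- ===== PORT B =====
def es_operador_relacional_alt (lexema : String) : Bool :=
  [['<'], ['>'], ['=', '='], ['!', '='], ['<', '='], ['>', '=']].contains lexema.toList

-- ===== PRECONDITION & SPEC =====
def Spec_es_operador_relacional (lexema : String) (out : Bool) : Prop := out = es_operador_relacional_alt lexema
instance (lexema : String) (out : Bool) : Decidable (Spec_es_operador_relacional lexema out) := by unfold Spec_es_operador_relacional; infer_instance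

-- ===== CLAIM (what is proved, stated in full; the proofs are below) =====
def Claim_equal_es_operador_relacional : Prop := ∀ (lexema : String), Dom_es_operador_relacional lexema → Spec_es_operador_relacional lexema (es_operador_relacional lexema)

-- ===== LEMMAS AND PROOFS =====

-- the DFA loop from the start state agrees with the six-sequence membership test
theorem pvLoopA_eq (l : List Char) :
    pvLoopA 0 l =
      [['<'], ['>'], ['=', '='], ['!', '='], ['<', '='], ['>', '=']].contains l := by
  rcases l with _ | ⟨c, _ | ⟨d, _ | ⟨e, rest⟩⟩⟩
  · decide
  · simp only [pvLoopA, pvDELTA, pvSigmaIdx, List.contains_eq_mem, List.mem_cons,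
      List.not_mem_nil, List.cons.injEq, and_true, or_false, List.getD]
    split_ifs <;> simp_all
  · simp only [pvLoopA, pvDELTA, pvSigmaIdx, List.contains_eq_mem, List.mem_cons,
      List.not_mem_nil, List.cons.injEq, and_true, or_false, List.getD]
    split_ifs <;> simp_all
  · -- lists of length ≥ 3: both sides are false
    have hidx : ∀ x : Char, pvSigmaIdx x = 0 ∨ pvSigmaIdx x = 1 ∨ pvSigmaIdx x = 2 ∨
        pvSigmaIdx x = 3 ∨ pvSigmaIdx x = 4 := by
      intro x; unfold pvSigmaIdx; split_ifs <;> simp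
    have step : ∀ (s : Nat) (x : Char) (r : List Char),
        pvLoopA s (x :: r) =
          if ((pvDELTA.getD s []).getD (pvSigmaIdx x) 4) = 4 then false
          else pvLoopA ((pvDELTA.getD s []).getD (pvSigmaIdx x) 4) r := by
      intro s x r; rfl
    have hdead : ∀ (x : Char) (r : List Char), pvLoopA 3 (x :: r) = false := by
      intro x r
      rw [step]
      rcases hidx x with h | h | h | h | h <;> simp [pvDELTA, h]
    have h1 : pvLoopA 1 (d :: e :: rest) = false := by
      rw [step]
      rcases hidx d with h | h | h | h | h <;> simp [pvDELTA, h, hdead]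
    have h2 : pvLoopA 2 (d :: e :: rest) = false := by
      rw [step]
      rcases hidx d with h | h | h | h | h <;> simp [pvDELTA, h, hdead]
    have hrhs : ([['<'], ['>'], ['=', '='], ['!', '='], ['<', '='], ['>', '=']].contains
        (c :: d :: e :: rest)) = false := by
      simp [List.contains_eq_mem]
    rw [hrhs, step]
    rcases hidx c with h | h | h | h | h <;> simp [pvDELTA, h, h1, h2]

-- ===== VERDICT (by name: the statement is the Claim_ definition above) =====
theorem es_operador_relacional_spec : Claim_equal_es_operador_relacional := by
  intro lexema _
  unfold Spec_es_operador_relacional es_operador_relacional es_operador_relacional_alt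
  exact pvLoopA_eq lexema.toList
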